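-- pv_equiv track=rewrite | github.com/esethuraman/SearchEngine | CodeBase/Index.py | index_each_file
-- ===== SOURCE A (Python) =====
-- def index_each_file(file_contents):
--     fileIndex = {}
--     for index, word in enumerate(file_contents):
--         if word in fileIndex.keys():
--             fileIndex[word] = fileIndex[word]+1
--         else:
--             fileIndex[word] = 1
--     return fileIndex
-- ===== SOURCE B (Python) =====
-- def index_each_file(file_contents):
--     # Simpler: deduplicate to first-occurrence order, then count each distinct word once.
--     return {word: file_contents.count(word) for word in dict.fromkeys(file_contents)}
-- ===== Notes on version B (the rewrite author's own statement) =====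
-- stated objective: simpler
-- what changed: Replaces the incremental per-element counter updates with a dedup (first-occurrence order) followed by counting each distinct word with list.count, built as a dict comprehension.
import Mathlib
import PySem

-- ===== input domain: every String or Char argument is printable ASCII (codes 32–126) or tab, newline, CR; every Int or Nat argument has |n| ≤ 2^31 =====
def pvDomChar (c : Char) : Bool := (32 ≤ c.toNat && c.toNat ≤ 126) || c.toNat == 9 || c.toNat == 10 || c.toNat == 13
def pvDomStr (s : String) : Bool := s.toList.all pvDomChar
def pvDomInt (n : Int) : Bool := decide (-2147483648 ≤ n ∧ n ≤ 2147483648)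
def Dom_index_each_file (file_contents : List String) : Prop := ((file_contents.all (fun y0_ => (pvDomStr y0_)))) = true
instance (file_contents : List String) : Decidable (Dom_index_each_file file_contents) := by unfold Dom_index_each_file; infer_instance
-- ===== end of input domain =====

-- B replaces A's incremental counter updates with dedup-then-count-each-word (objective: simpler).

-- ===== PORT A =====
def index_each_file (file_contents : List String) : List (String × Int) :=
  ((PySem.List.enumerate file_contents 0).foldl
    (fun fileIndex p =>
      let word := p.2
      if fileIndex.contains word then
        fileIndex.insert word (fileIndex.getD word 0 + 1)
      else
        fileIndex.insert word 1)
    PySem.Dict.empty).items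

-- ===== PORT B =====
def index_each_file_alt (file_contents : List String) : List (String × Int) :=
  (PySem.List.dedup file_contents).map
    (fun word => (word, (PySem.List.count file_contents word : Int)))

-- ===== PRECONDITION & SPEC =====
def Spec_index_each_file (file_contents : List String) (out : List (String × Int)) : Prop := out = index_each_file_alt file_contents
instance (file_contents : List String) (out : List (String × Int)) : Decidable (Spec_index_each_file file_contents out) := by unfold Spec_index_each_file; infer_instance

-- ===== CLAIM (what is proved, stated in full; the proofs are below) =====
def Claim_equal_index_each_file : Prop := ∀ (file_contents : List String), Dom_index_each_file file_contents → Spec_index_each_file file_contents (index_each_file file_contents)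

-- ===== LEMMAS AND PROOFS =====

-- A's loop body, with the contains-branch resolved, is the counter step.
theorem step_eq (d : PySem.Dict String Int) (w : String) :
    (if d.contains w then d.insert w (d.getD w 0 + 1) else d.insert w 1) =
      d.insert w (d.getD w 0 + 1) := by
  by_cases h : d.contains w = true
  · simp [h]
  · simp only [Bool.not_eq_true] at h
    rw [PySem.Dict.getD_of_not_contains d 0 h]
    simp [h]

-- Folding A's body over enumerate equals folding the counter step over the list itself.
theorem foldl_enumerate_eq (xs : List String) :
    ∀ (s : Int) (d : PySem.Dict String Int),
      (PySem.List.enumerate xs s).foldl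
        (fun fileIndex p =>
          let word := p.2
          if fileIndex.contains word then
            fileIndex.insert word (fileIndex.getD word 0 + 1)
          else
            fileIndex.insert word 1) d =
      xs.foldl (fun d x => d.insert x (d.getD x 0 + 1)) d := by
  induction xs with
  | nil => intro s d; simp [PySem.List.enumerate_nil]
  | cons x t ih =>
      intro s d
      simp only [PySem.List.enumerate_cons, List.foldl_cons]
      rw [step_eq, ih]

-- ===== VERDICT (by name: the statement is the Claim_ definition above) =====
theorem index_each_file_spec : Claim_equal_index_each_file := by
  intro xs _
  show index_each_file xs = index_each_file_alt xs
  unfold index_each_file index_each_file_alt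
  rw [foldl_enumerate_eq xs 0 PySem.Dict.empty,
    PySem.Dict.foldl_insert_getD_add_one_eq_counter,
    PySem.Dict.items_counter, PySem.List.dedup_eq_ofList]
  simp [PySem.List.count_eq]
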